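-- pv_equiv track=rewrite | github.com/tonyaiuto/aoc | 2024/22/day22.py | calc_changes
-- ===== SOURCE A (Python) =====
-- def evolve(secret):
--     secret = secret ^ (secret << 6)
--     secret = secret & 0xffffff  # prune  secret % 16777216, secret % 0x1000000
--     secret = secret ^ (secret >> 5)
--     secret = secret & 0xffffff  # prune
--     secret = secret ^ (secret << 11)
--     secret = secret & 0xffffff  # prune
--     return secret
--
-- def calc_changes(initial, n=2000):
--   cur = initial
--   cur_d = cur % 10
--   changes = []
--   prices = []
--   for i in range(n):
--     nxt = evolve(cur)
--     nxt_d = nxt % 10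
--     changes.append(nxt_d - cur_d)
--     prices.append(nxt_d)
--     cur = nxt
--     cur_d = nxt_d
--   return changes, prices
-- ===== SOURCE B (Python) =====
-- def evolve(secret):
--     secret = secret ^ (secret << 6)
--     secret = secret & 0xffffff
--     secret = secret ^ (secret >> 5)
--     secret = secret & 0xffffff
--     secret = secret ^ (secret << 11)
--     secret = secret & 0xffffff
--     return secret
--
-- def calc_changes(initial, n=2000):
--   # Build the full digit sequence (length n+1, including the initial digit),
--   # then derive prices and pairwise-difference changes in separate passes.
--   full = [initial % 10]
--   cur = initial
--   for _ in range(n):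
--     cur = evolve(cur)
--     full.append(cur % 10)
--   prices = full[1:]
--   changes = [b - a for a, b in zip(full, full[1:])]
--   return changes, prices
-- ===== Notes on version B (the rewrite author's own statement) =====
-- stated objective: alternative
-- what changed: Replaces the fused loop that tracks the previous digit and appends to both result lists each step by first building the full digit sequence (initial digit included) and then deriving prices as full[1:] and changes as pairwise differences via zip in separate passes.
import Mathlib
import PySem

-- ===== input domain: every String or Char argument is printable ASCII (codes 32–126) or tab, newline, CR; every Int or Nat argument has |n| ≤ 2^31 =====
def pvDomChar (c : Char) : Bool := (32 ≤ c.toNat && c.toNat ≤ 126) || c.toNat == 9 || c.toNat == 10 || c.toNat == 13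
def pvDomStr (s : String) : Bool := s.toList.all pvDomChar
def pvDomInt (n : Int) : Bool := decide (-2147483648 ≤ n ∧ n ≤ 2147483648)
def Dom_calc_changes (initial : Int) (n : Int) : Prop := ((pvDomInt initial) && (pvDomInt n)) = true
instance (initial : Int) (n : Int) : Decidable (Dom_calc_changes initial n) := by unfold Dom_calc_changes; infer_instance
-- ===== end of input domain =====

-- B builds the full digit sequence once and derives prices/changes in separate passes;
-- A fuses everything into one loop with a tracked previous digit. Same values everywhere.

-- ===== PORT A =====
def evolve (secret : Int) : Int :=
  let s1 := PySem.Int.bxor secret (secret <<< 6)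
  let s2 := PySem.Int.band s1 0xffffff
  let s3 := PySem.Int.bxor s2 (s2 >>> 5)
  let s4 := PySem.Int.band s3 0xffffff
  let s5 := PySem.Int.bxor s4 (s4 <<< 11)
  PySem.Int.band s5 0xffffff

def calc_changes (initial : Int) (n : Int) : List Int × List Int :=
  let cur := initial
  let cur_d := PySem.Int.mod cur 10
  let st := (PySem.List.pyRange 0 n 1).foldl
    (fun (st : Int × Int × List Int × List Int) _ =>
      let nxt := evolve st.1
      let nxt_d := PySem.Int.mod nxt 10
      (nxt, nxt_d, st.2.2.1 ++ [nxt_d - st.2.1], st.2.2.2 ++ [nxt_d]))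
    (cur, cur_d, [], [])
  (st.2.2.1, st.2.2.2)

-- ===== PORT B =====
-- B's accumulation loop `for _ in range(n): cur = evolve(cur); full.append(cur % 10)`
-- (it runs max(n,0) = n.toNat times), seeded with the initial digit:
def fullDigits (cur : Int) : Nat → List Int
  | 0 => [PySem.Int.mod cur 10]
  | k + 1 => PySem.Int.mod cur 10 :: fullDigits (evolve cur) k

def calc_changes_alt (initial : Int) (n : Int) : List Int × List Int :=
  let full := fullDigits initial n.toNat
  let prices := full.drop 1                 -- full[1:]
  let changes := List.zipWith (fun a b => b - a) full (full.drop 1)  -- zip(full, full[1:])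
  (changes, prices)

-- ===== PRECONDITION & SPEC =====
def Spec_calc_changes (initial : Int) (n : Int) (out : List Int × List Int) : Prop := out = calc_changes_alt initial n
instance (initial : Int) (n : Int) (out : List Int × List Int) : Decidable (Spec_calc_changes initial n out) := by unfold Spec_calc_changes; infer_instance

-- ===== CLAIM (what is proved, stated in full; the proofs are below) =====
def Claim_equal_calc_changes : Prop := ∀ (initial : Int) (n : Int), Dom_calc_changes initial n → Spec_calc_changes initial n (calc_changes initial n)

-- ===== LEMMAS AND PROOFS =====

def iterEvolve (c : Int) : Nat → Int
  | 0 => c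
  | k + 1 => iterEvolve (evolve c) k

theorem fullDigits_head_drop (c : Int) (k : Nat) :
    fullDigits c k = PySem.Int.mod c 10 :: (fullDigits c k).drop 1 := by
  cases k <;> simp [fullDigits]

theorem drop_one_fullDigits_succ (c : Int) (k : Nat) :
    (fullDigits c (k + 1)).drop 1 = fullDigits (evolve c) k := by
  simp [fullDigits]

theorem zip_fullDigits_succ (c : Int) (k : Nat) :
    List.zipWith (fun a b => b - a) (fullDigits c (k + 1)) ((fullDigits c (k + 1)).drop 1)
      = (PySem.Int.mod (evolve c) 10 - PySem.Int.mod c 10)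
        :: List.zipWith (fun a b => b - a) (fullDigits (evolve c) k) ((fullDigits (evolve c) k).drop 1) := by
  conv_lhs => rw [drop_one_fullDigits_succ, show fullDigits c (k+1) = PySem.Int.mod c 10 :: fullDigits (evolve c) k from rfl,
    fullDigits_head_drop (evolve c) k]
  rw [List.zipWith_cons_cons]
  rw [← fullDigits_head_drop]

theorem loop_eq (l : List Int) (c : Int) (ch pr : List Int) :
    l.foldl
      (fun (st : Int × Int × List Int × List Int) _ =>
        let nxt := evolve st.1
        let nxt_d := PySem.Int.mod nxt 10
        (nxt, nxt_d, st.2.2.1 ++ [nxt_d - st.2.1], st.2.2.2 ++ [nxt_d]))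
      (c, PySem.Int.mod c 10, ch, pr)
    = (iterEvolve c l.length, PySem.Int.mod (iterEvolve c l.length) 10,
       ch ++ List.zipWith (fun a b => b - a) (fullDigits c l.length) ((fullDigits c l.length).drop 1),
       pr ++ (fullDigits c l.length).drop 1) := by
  induction l generalizing c ch pr with
  | nil => simp [fullDigits, iterEvolve]
  | cons a l ih =>
      rw [List.foldl_cons]
      simp only
      rw [ih (evolve c)]
      simp only [List.length_cons, iterEvolve]
      rw [zip_fullDigits_succ, drop_one_fullDigits_succ]
      simp only [List.append_assoc, List.singleton_append]
      rw [← fullDigits_head_drop]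

-- ===== VERDICT (by name: the statement is the Claim_ definition above) =====
theorem calc_changes_spec : Claim_equal_calc_changes := by
  intro initial n _
  unfold Spec_calc_changes calc_changes calc_changes_alt
  simp only
  rw [loop_eq]
  simp [PySem.List.length_pyRange_one]
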